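-- pv_equiv track=rewrite | github.com/nicbenji/aoc2024-python | aoc2402.py | checkReport
-- ===== SOURCE A (Python) =====
-- def checkReport(report):
--     isIncreasing = False
--     isDecreasing = False
--     problemIndex = -1
--
--     if len(report) <= 1:
--         return problemIndex
--     for j in range(len(report) - 1):
--
--         diff = report[j + 1] - report[j]
--
--         if abs(diff) < 1 or abs(diff) > 3:
--             problemIndex = j
--             break
--         if diff > 0:
--             isIncreasing = True
--         elif diff < 0:
--             isDecreasing = True
--         if isIncreasing == isDecreasing:
--             problemIndex = j
--             break
--
--     return problemIndex
-- ===== SOURCE B (Python) =====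
-- def checkReport(report):
--     diffs = [b - a for a, b in zip(report, report[1:])]
--     if not diffs:
--         return -1
--     n = len(diffs)
--     d0 = diffs[0]
--     firstMag = next((i for i, d in enumerate(diffs) if not 1 <= abs(d) <= 3), n)
--     firstDir = next((i for i, d in enumerate(diffs) if d * d0 <= 0), n)
--     idx = min(firstMag, firstDir)
--     return idx if idx < n else -1
-- ===== Notes on version B (the rewrite author's own statement) =====
-- stated objective: alternative
-- what changed: Replaces the intertwined sticky-flag loop (isIncreasing/isDecreasing state with breaks) by building the list of consecutive differences once and combining two independent first-index scans (first magnitude fault, first sign opposing the first difference) with a min and a sentinel.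
import Mathlib
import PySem

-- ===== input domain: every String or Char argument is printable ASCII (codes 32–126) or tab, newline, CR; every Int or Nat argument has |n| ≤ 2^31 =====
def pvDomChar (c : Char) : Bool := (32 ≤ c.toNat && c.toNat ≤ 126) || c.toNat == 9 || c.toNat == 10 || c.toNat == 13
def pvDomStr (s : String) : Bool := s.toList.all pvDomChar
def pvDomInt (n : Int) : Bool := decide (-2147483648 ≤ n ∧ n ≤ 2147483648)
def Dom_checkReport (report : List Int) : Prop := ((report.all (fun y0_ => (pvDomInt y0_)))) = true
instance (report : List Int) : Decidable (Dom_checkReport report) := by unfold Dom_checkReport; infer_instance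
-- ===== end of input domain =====

-- B replaces A's sticky-flag loop by two independent first-fault scans over the
-- difference list combined by a min; same O(n) cost, different decomposition.

-- ===== PORT A =====
-- the for-loop with break, over range(len(report)-1); flags isIncreasing/isDecreasing
def checkReportGo (report : List Int) : List Int → Bool → Bool → Int
  | [], _, _ => -1
  | j :: rest, isInc, isDec =>
    let diff := PySem.List.pyGetD report (j + 1) 0 - PySem.List.pyGetD report j 0
    if |diff| < 1 ∨ |diff| > 3 then j
    else
      let isInc' := if diff > 0 then true else isInc
      let isDec' := if ¬ diff > 0 ∧ diff < 0 then true else isDec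
      if isInc' == isDec' then j
      else checkReportGo report rest isInc' isDec'

def checkReport (report : List Int) : Int :=
  if report.length ≤ 1 then -1
  else checkReportGo report (PySem.List.pyRange 0 ((report.length : Int) - 1) 1) false false

-- ===== PORT B =====
def checkReport_alt (report : List Int) : Int :=
  let diffs := (report.zip (report.drop 1)).map (fun p => p.2 - p.1)
  match diffs with
  | [] => -1
  | d0 :: _ =>
    let n := diffs.length
    let firstMag := (diffs.findIdx? (fun d => !(1 ≤ |d| && |d| ≤ 3))).getD n
    let firstDir := (diffs.findIdx? (fun d => decide (d * d0 ≤ 0))).getD n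
    let idx := min firstMag firstDir
    if idx < n then (idx : Int) else -1

-- ===== PRECONDITION & SPEC =====
def Spec_checkReport (report : List Int) (out : Int) : Prop := out = checkReport_alt report
instance (report : List Int) (out : Int) : Decidable (Spec_checkReport report out) := by unfold Spec_checkReport; infer_instance

-- ===== CLAIM (what is proved, stated in full; the proofs are below) =====
def Claim_equal_checkReport : Prop := ∀ (report : List Int), Dom_checkReport report → Spec_checkReport report (checkReport report)

-- ===== LEMMAS AND PROOFS =====

-- abbreviations used only by the proofs
def pvBad (d : Int) : Bool := !(1 ≤ |d| && |d| ≤ 3)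
def pvDiffs (r : List Int) : List Int := (r.zip (r.drop 1)).map (fun p => p.2 - p.1)

theorem length_pvDiffs (r : List Int) : (pvDiffs r).length = r.length - 1 := by
  simp [pvDiffs]

theorem getD_pvDiffs (r : List Int) (j : Nat) (h : j < (pvDiffs r).length) :
    (pvDiffs r).getD j 0 = r.getD (j+1) 0 - r.getD j 0 := by
  have hl := length_pvDiffs r
  have hj1 : j + 1 < r.length := by omega
  have hj : j < r.length := by omega
  rw [List.getD_eq_getElem _ _ h, List.getD_eq_getElem _ _ hj1, List.getD_eq_getElem _ _ hj]
  simp [pvDiffs]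

theorem pyDiff_at (r : List Int) (j : Nat) (h : j < (pvDiffs r).length) :
    PySem.List.pyGetD r ((j : Int) + 1) 0 - PySem.List.pyGetD r (j : Int) 0
      = (pvDiffs r)[j] := by
  have : ((j : Int) + 1) = ((j + 1 : Nat) : Int) := by push_cast; ring
  rw [this, PySem.List.pyGetD_natCast, PySem.List.pyGetD_natCast]
  rw [← List.getD_eq_getElem _ 0 h, getD_pvDiffs r j h]

theorem optGetD_map_succ (o : Option Nat) (n : Nat) :
    ((o.map (fun i => i + 1)).getD (n+1)) = o.getD n + 1 := by cases o <;> rfl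

theorem findIdx?_min (l : List Int) (p q : Int → Bool) :
    min ((l.findIdx? p).getD l.length) ((l.findIdx? q).getD l.length)
      = (l.findIdx? (fun d => p d || q d)).getD l.length := by
  induction l with
  | nil => rfl
  | cons a t ih =>
    by_cases hp : p a <;> by_cases hq : q a <;>
      simp [List.findIdx?_cons, hp, hq]
    rw [← ih]

theorem findIdx?_lt_length {l : List Int} {p : Int → Bool} {k : Nat}
    (h : l.findIdx? p = some k) : k < l.length := by
  rcases List.findIdx?_eq_some_iff_getElem.mp h with ⟨h1, _⟩
  exact h1

-- A's loop once the increasing flag is set: first magnitude fault or non-positive diff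
theorem go_run_inc (r : List Int) :
    ∀ (m s : Nat), s + m = (pvDiffs r).length →
    checkReportGo r ((List.range' s m).map (fun k : Nat => (k : Int))) true false =
      (match ((pvDiffs r).drop s).findIdx? (fun d => pvBad d || decide (d ≤ 0)) with
       | some k => ((s + k : Nat) : Int)
       | none => -1) := by
  intro m
  induction m with
  | zero =>
    intro s hs
    have hnil : (pvDiffs r).drop s = [] := List.drop_eq_nil_of_le (by omega)
    simp [hnil, checkReportGo]
  | succ m ih =>
    intro s hs
    have hsl : s < (pvDiffs r).length := by omega
    have hdrop : (pvDiffs r).drop s = (pvDiffs r)[s] :: (pvDiffs r).drop (s+1) :=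
      List.drop_eq_getElem_cons hsl
    have hdiff := pyDiff_at r s hsl
    generalize hd : (pvDiffs r)[s] = d at hdiff hdrop
    rw [List.range'_succ, List.map_cons]
    by_cases hbad : |d| < 1 ∨ |d| > 3
    · have hpb : pvBad d = true := by simp [pvBad]; rcases abs_cases d with ⟨h9,_⟩|⟨h9,_⟩ <;> omega
      simp only [checkReportGo, hdiff, hdrop, List.findIdx?_cons]
      rw [if_pos hbad]
      simp [hpb]
    · have hpb : pvBad d = false := by simp [pvBad]; rcases abs_cases d with ⟨h9,_⟩|⟨h9,_⟩ <;> omega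
      simp only [checkReportGo, hdiff, hdrop, List.findIdx?_cons]
      rw [if_neg hbad]
      by_cases hpos : d > 0
      · have hnle : ¬ (d ≤ 0) := by omega
        have hcond : ¬ (¬ d > 0 ∧ d < 0) := by omega
        simp only [ite_self]
        rw [if_neg hcond, if_neg (by simp : ¬ ((true == false) = true)),
            if_neg (by simp [hpb, hnle] : ¬ ((pvBad d || decide (d ≤ 0)) = true)),
            ih (s+1) (by omega)]
        cases h : ((pvDiffs r).drop (s+1)).findIdx? (fun d => pvBad d || decide (d ≤ 0)) <;>
          simp [h] <;> push_cast <;> ring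
      · have hneg : d < 0 := by
          have h1 : ¬ |d| < 1 := (not_or.mp hbad).1
          have h2 : d ≤ 0 := by omega
          have := abs_of_nonpos h2
          omega
        have hle : d ≤ 0 := by omega
        simp only [ite_self]
        rw [if_pos (⟨hpos, hneg⟩ : ¬ d > 0 ∧ d < 0)]
        simp [hle]

-- A's loop once the decreasing flag is set: first magnitude fault or non-negative diff
theorem go_run_dec (r : List Int) :
    ∀ (m s : Nat), s + m = (pvDiffs r).length →
    checkReportGo r ((List.range' s m).map (fun k : Nat => (k : Int))) false true =
      (match ((pvDiffs r).drop s).findIdx? (fun d => pvBad d || decide (0 ≤ d)) with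
       | some k => ((s + k : Nat) : Int)
       | none => -1) := by
  intro m
  induction m with
  | zero =>
    intro s hs
    have hnil : (pvDiffs r).drop s = [] := List.drop_eq_nil_of_le (by omega)
    simp [hnil, checkReportGo]
  | succ m ih =>
    intro s hs
    have hsl : s < (pvDiffs r).length := by omega
    have hdrop : (pvDiffs r).drop s = (pvDiffs r)[s] :: (pvDiffs r).drop (s+1) :=
      List.drop_eq_getElem_cons hsl
    have hdiff := pyDiff_at r s hsl
    generalize hd : (pvDiffs r)[s] = d at hdiff hdrop
    rw [List.range'_succ, List.map_cons]
    by_cases hbad : |d| < 1 ∨ |d| > 3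
    · have hpb : pvBad d = true := by simp [pvBad]; rcases abs_cases d with ⟨h9,_⟩|⟨h9,_⟩ <;> omega
      simp only [checkReportGo, hdiff, hdrop, List.findIdx?_cons]
      rw [if_pos hbad]
      simp [hpb]
    · have hpb : pvBad d = false := by simp [pvBad]; rcases abs_cases d with ⟨h9,_⟩|⟨h9,_⟩ <;> omega
      simp only [checkReportGo, hdiff, hdrop, List.findIdx?_cons]
      rw [if_neg hbad]
      by_cases hpos : d > 0
      · have hge : (0:Int) ≤ d := le_of_lt hpos
        simp only [ite_self]
        rw [if_pos hpos]
        simp [hge]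
      · have hneg : d < 0 := by
          have h1 : ¬ |d| < 1 := (not_or.mp hbad).1
          have h2 : d ≤ 0 := by omega
          have := abs_of_nonpos h2
          omega
        have hnge : ¬ ((0:Int) ≤ d) := by omega
        simp only [ite_self]
        rw [if_neg hpos]
        rw [if_neg (by simp : ¬ ((false == true) = true)),
            if_neg (by simp [hpb, hnge] : ¬ ((pvBad d || decide (0 ≤ d)) = true)),
            ih (s+1) (by omega)]
        cases h : ((pvDiffs r).drop (s+1)).findIdx? (fun d => pvBad d || decide (0 ≤ d)) <;>
          simp [h] <;> push_cast <;> ring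

theorem alt_char (r : List Int) :
    checkReport_alt r =
      (match pvDiffs r with
       | [] => -1
       | d0 :: _ =>
         let n := (pvDiffs r).length
         let firstMag := ((pvDiffs r).findIdx? pvBad).getD n
         let firstDir := ((pvDiffs r).findIdx? (fun d => decide (d * d0 ≤ 0))).getD n
         let idx := min firstMag firstDir
         if idx < n then (idx : Int) else -1) := rfl

theorem A_eq_B (r : List Int) : checkReport r = checkReport_alt r := by
  by_cases hL : r.length ≤ 1
  · have h0 : (pvDiffs r).length = 0 := by rw [length_pvDiffs]; omega
    have hnil : pvDiffs r = [] := List.eq_nil_of_length_eq_zero h0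
    rw [alt_char, hnil]
    simp [checkReport, hL]
  · have hn : (pvDiffs r).length = r.length - 1 := length_pvDiffs r
    obtain ⟨d0, rest, hD⟩ : ∃ d0 rest, pvDiffs r = d0 :: rest := by
      cases h : pvDiffs r with
      | nil => rw [h] at hn; simp at hn; omega
      | cons a t => exact ⟨a, t, rfl⟩
    have hlen : (pvDiffs r).length = rest.length + 1 := by rw [hD]; simp
    have hrange : PySem.List.pyRange 0 ((r.length : Int) - 1) 1
        = (List.range' 0 ((pvDiffs r).length)).map (fun k : Nat => (k : Int)) := by
      have h1 : ((r.length : Int) - 1) = (((pvDiffs r).length : Nat) : Int) := by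
        rw [hn]; push_cast; omega
      rw [h1, PySem.List.pyRange_zero_natCast, List.range_eq_range']
    have hA : checkReport r
        = checkReportGo r ((List.range' 0 ((pvDiffs r).length)).map (fun k : Nat => (k:Int)))
            false false := by
      simp only [checkReport]
      rw [if_neg hL, hrange]
    rw [hA, hlen, List.range'_succ, List.map_cons]
    have h0l : 0 < (pvDiffs r).length := by omega
    have hdiff0 := pyDiff_at r 0 h0l
    have hget0 : (pvDiffs r)[0]'h0l = d0 := by simp [hD]
    rw [hget0] at hdiff0
    rw [alt_char, hD]
    have hdrop1 : (pvDiffs r).drop 1 = rest := by rw [hD]; rfl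
    simp only [checkReportGo, hdiff0]
    by_cases hbad : |d0| < 1 ∨ |d0| > 3
    · have hpb : pvBad d0 = true := by
        simp [pvBad]; rcases abs_cases d0 with ⟨h9,_⟩|⟨h9,_⟩ <;> omega
      rw [if_pos hbad]
      simp [List.findIdx?_cons, hpb]
    · have hpb : pvBad d0 = false := by
        simp [pvBad]; rcases abs_cases d0 with ⟨h9,_⟩|⟨h9,_⟩ <;> omega
      have hne0 : d0 ≠ 0 := by
        intro h
        rcases not_or.mp hbad with ⟨h1, _⟩
        rw [h] at h1; simp at h1
      rw [if_neg hbad]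
      have hdir0 : ¬ (d0 * d0 ≤ 0) := by
        rcases lt_or_gt_of_ne hne0 with h | h
        · nlinarith
        · nlinarith
      by_cases hpos : d0 > 0
      · -- increasing start
        have hcond : ¬ (¬ d0 > 0 ∧ d0 < 0) := by omega
        rw [if_pos hpos, if_neg hcond, if_neg (by simp : ¬ ((true == false) = true))]
        rw [go_run_inc r rest.length 1 (by omega), hdrop1]
        have hpredeq : (fun d => pvBad d || decide (d * d0 ≤ 0))
            = (fun d => pvBad d || decide (d ≤ 0)) := by
          funext d
          congr 1
          rw [decide_eq_decide]
          constructor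
          · intro h; nlinarith
          · intro h; nlinarith
        rw [List.findIdx?_cons, List.findIdx?_cons, if_neg (by simp [hpb] : ¬ (pvBad d0 = true)),
            if_neg (by simp [hdir0] : ¬ (decide (d0 * d0 ≤ 0) = true))]
        simp only [List.length_cons, optGetD_map_succ, Nat.add_min_add_right, findIdx?_min]
        rw [hpredeq]
        cases h : rest.findIdx? (fun d => pvBad d || decide (d ≤ 0)) with
        | none => simp [h]
        | some k =>
          have hk := findIdx?_lt_length h
          simp only [Option.getD_some]
          rw [if_pos (by omega)]
          push_cast; ring
      · -- decreasing start
        have hneg : d0 < 0 := by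
          rcases not_or.mp hbad with ⟨h1, _⟩
          have h2 : d0 ≤ 0 := by omega
          have := abs_of_nonpos h2
          omega
        rw [if_neg hpos, if_pos (⟨hpos, hneg⟩ : (¬ d0 > 0 ∧ d0 < 0)),
            if_neg (by simp : ¬ ((false == true) = true))]
        rw [go_run_dec r rest.length 1 (by omega), hdrop1]
        have hpredeq : (fun d => pvBad d || decide (d * d0 ≤ 0))
            = (fun d => pvBad d || decide (0 ≤ d)) := by
          funext d
          congr 1
          rw [decide_eq_decide]
          constructor
          · intro h; nlinarith
          · intro h; nlinarith
        rw [List.findIdx?_cons, List.findIdx?_cons, if_neg (by simp [hpb] : ¬ (pvBad d0 = true)),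
            if_neg (by simp [hdir0] : ¬ (decide (d0 * d0 ≤ 0) = true))]
        simp only [List.length_cons, optGetD_map_succ, Nat.add_min_add_right, findIdx?_min]
        rw [hpredeq]
        cases h : rest.findIdx? (fun d => pvBad d || decide (0 ≤ d)) with
        | none => simp [h]
        | some k =>
          have hk := findIdx?_lt_length h
          simp only [Option.getD_some]
          rw [if_pos (by omega)]
          push_cast; ring

-- ===== VERDICT (by name: the statement is the Claim_ definition above) =====
theorem checkReport_spec : Claim_equal_checkReport := by
  intro r _
  unfold Spec_checkReport
  exact A_eq_B r
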